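-- pv_equiv track=rewrite | github.com/bestdeep/bitsec_subnet | endpoint/compare_one_to_many_solidity_parallel.py | strip_comments_preserve_lines
-- ===== SOURCE A (Python) =====
-- from typing import List, Tuple, Dict
--
-- def strip_comments_preserve_lines(source: str) -> List[Tuple[int, str]]:
--     result_lines: List[Tuple[int, str]] = []
--     i = 0
--     n = len(source)
--     lineno = 1
--     cur_chars: List[str] = []
--
--     in_block = False
--     in_string = False
--     string_delim = None
--     while i < n:
--         ch = source[i]
--
--         if in_block:
--             if ch == '*' and i + 1 < n and source[i+1] == '/':
--                 in_block = False
--                 i += 2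
--                 continue
--             if ch == '\n':
--                 result_lines.append((lineno, "".join(cur_chars)))
--                 cur_chars = []
--                 lineno += 1
--             i += 1
--             continue
--
--         if in_string:
--             if ch == '\\' and i + 1 < n:
--                 cur_chars.append(ch); cur_chars.append(source[i+1]); i += 2; continue
--             if ch == string_delim:
--                 cur_chars.append(ch); in_string = False; string_delim = None; i += 1; continue
--             if ch == '\n':
--                 cur_chars.append(ch); result_lines.append((lineno, "".join(cur_chars))); cur_chars = []; lineno += 1; i += 1; continue
--             cur_chars.append(ch); i += 1; continue
--
--         if ch == '"' or ch == "'":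
--             in_string = True; string_delim = ch; cur_chars.append(ch); i += 1; continue
--
--         if ch == '/' and i + 1 < n and source[i+1] == '*':
--             in_block = True; i += 2; continue
--
--         if ch == '/' and i + 1 < n and source[i+1] == '/':
--             i += 2
--             while i < n and source[i] not in '\n\r':
--                 i += 1
--             continue
--
--         if ch == '\r':
--             i += 1; continue
--
--         if ch == '\n':
--             result_lines.append((lineno, "".join(cur_chars)))
--             cur_chars = []
--             lineno += 1
--             i += 1
--             continue
--
--         cur_chars.append(ch)
--         i += 1
--
--     if cur_chars or lineno == 1:
--         result_lines.append((lineno, "".join(cur_chars)))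
--     return result_lines
-- ===== SOURCE B (Python) =====
-- def strip_comments_preserve_lines(source):
--     # Segment-based rewrite: split into newline-separated segments and scan each, carrying
--     # (in_block, in_string, string_delim, buf, lineno) across segment boundaries.
--     result = []
--     in_block = False
--     in_string = False
--     string_delim = None
--     buf = []
--     lineno = 1
--     segments = source.split('\n')
--     last = len(segments) - 1
--     for idx, seg in enumerate(segments):
--         has_nl = idx < last          # a '\n' followed this segment in the source
--         consumed_nl = False          # that '\n' swallowed by a string escape
--         j = 0
--         m = len(seg)
--         while j < m:
--             ch = seg[j]
--             if in_block:
--                 if ch == '*' and j + 1 < m and seg[j+1] == '/':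
--                     in_block = False
--                     j += 2
--                 else:
--                     j += 1
--             elif in_string:
--                 if ch == '\\':
--                     if j + 1 < m:
--                         buf.append(ch); buf.append(seg[j+1]); j += 2
--                     else:
--                         buf.append(ch)
--                         if has_nl:
--                             buf.append('\n'); consumed_nl = True
--                         j += 1
--                 elif ch == string_delim:
--                     buf.append(ch); in_string = False; string_delim = None; j += 1
--                 else:
--                     buf.append(ch); j += 1
--             elif ch == '"' or ch == "'":
--                 in_string = True; string_delim = ch; buf.append(ch); j += 1
--             elif ch == '/' and j + 1 < m and seg[j+1] == '*':
--                 in_block = True; j += 2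
--             elif ch == '/' and j + 1 < m and seg[j+1] == '/':
--                 j += 2
--                 while j < m and seg[j] != '\r':
--                     j += 1
--             elif ch == '\r':
--                 j += 1
--             else:
--                 buf.append(ch); j += 1
--         if has_nl:
--             if not consumed_nl:
--                 if in_string:
--                     buf.append('\n')
--                 result.append((lineno, ''.join(buf)))
--                 buf = []
--                 lineno += 1
--         else:
--             if buf or lineno == 1:
--                 result.append((lineno, ''.join(buf)))
--     return result
-- ===== Notes on version B (the rewrite author's own statement) =====
-- stated objective: alternative
-- what changed: B replaces A's single global index-based scan over the whole source with an outer loop over the newline-separated line segments plus a per-segment character scan, carrying (in_block, in_string, string_delim, buffer, lineno) across segment boundaries and handling the removed newline explicitly at each boundary.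
import Mathlib
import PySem

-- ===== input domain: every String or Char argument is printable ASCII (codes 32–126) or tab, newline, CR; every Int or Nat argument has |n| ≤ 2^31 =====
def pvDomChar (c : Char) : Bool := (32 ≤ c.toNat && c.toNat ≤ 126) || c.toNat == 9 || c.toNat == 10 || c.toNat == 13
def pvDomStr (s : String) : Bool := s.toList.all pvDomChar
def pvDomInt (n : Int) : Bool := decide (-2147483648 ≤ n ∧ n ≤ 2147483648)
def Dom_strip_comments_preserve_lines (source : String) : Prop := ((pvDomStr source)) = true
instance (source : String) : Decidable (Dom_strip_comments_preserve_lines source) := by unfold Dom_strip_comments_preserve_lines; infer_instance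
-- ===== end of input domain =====

-- B re-implements the stripper by splitting the source into newline-separated segments
-- and scanning one segment at a time with carried state (alternative decomposition, same cost).

-- ===== PORT A =====
-- inner `while i < n and source[i] not in '\n\r': i += 1` of the line-comment branch
def skipLineA (xs : List Char) : List Char := xs.dropWhile (fun c => c != '\n' && c != '\r')

-- the main `while i < n` loop of A; the char list is source[i:], other args are A's mutable state
def scanA : Bool → Bool → Option Char → Int → List Char → List (Int × String) → List Char → List (Int × String)
  | _blk, _strg, _delim, lineno, buf, acc, [] =>
      if buf ≠ [] ∨ lineno = 1 then acc ++ [(lineno, String.ofList buf)] else acc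
  | blk, strg, delim, lineno, buf, acc, c :: rest =>
      if blk then
        if c = '*' ∧ rest.head? = some '/' then scanA false strg delim lineno buf acc rest.tail
        else if c = '\n' then scanA blk strg delim (lineno + 1) [] (acc ++ [(lineno, String.ofList buf)]) rest
        else scanA blk strg delim lineno buf acc rest
      else if strg then
        if c = '\\' ∧ rest ≠ [] then scanA blk strg delim lineno (buf ++ c :: rest.take 1) acc rest.tail
        else if some c = delim then scanA blk false none lineno (buf ++ [c]) acc rest
        else if c = '\n' then scanA blk strg delim (lineno + 1) [] (acc ++ [(lineno, String.ofList (buf ++ [c]))]) rest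
        else scanA blk strg delim lineno (buf ++ [c]) acc rest
      else if c = '"' ∨ c = '\'' then scanA blk true (some c) lineno (buf ++ [c]) acc rest
      else if c = '/' ∧ rest.head? = some '*' then scanA true strg delim lineno buf acc rest.tail
      else if c = '/' ∧ rest.head? = some '/' then scanA blk strg delim lineno buf acc (skipLineA rest.tail)
      else if c = '\r' then scanA blk strg delim lineno buf acc rest
      else if c = '\n' then scanA blk strg delim (lineno + 1) [] (acc ++ [(lineno, String.ofList buf)]) rest
      else scanA blk strg delim lineno (buf ++ [c]) acc rest
termination_by _ _ _ _ _ _ xs => xs.length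
decreasing_by
  all_goals simp only [skipLineA, List.length_cons, List.length_tail]
  all_goals first
    | omega
    | (refine Nat.lt_succ_of_le (Nat.le_trans (List.length_dropWhile_le _ _) ?_)
       simp only [List.length_tail]
       omega)

def strip_comments_preserve_lines (source : String) : List (Int × String) :=
  scanA false false none 1 [] [] source.toList

-- ===== PORT B =====
-- result of scanning one '\n'-free segment: the carried state after the segment
structure SegR where
  blk : Bool
  strg : Bool
  delim : Option Char
  buf : List Char
  consumed : Bool          -- the following '\n' was swallowed by a string escape
deriving Repr, DecidableEq

-- inner `while j < m` of B: skip of a line comment within the segment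
def skipSegB (xs : List Char) : List Char := xs.dropWhile (fun c => c != '\r')

-- B's per-segment scan; nl = "a '\n' followed this segment in the source"
def scanSeg : Bool → Bool → Option Char → List Char → Bool → List Char → SegR
  | blk, strg, delim, buf, _nl, [] => ⟨blk, strg, delim, buf, false⟩
  | blk, strg, delim, buf, nl, c :: rest =>
      if blk then
        if c = '*' ∧ rest.head? = some '/' then scanSeg false strg delim buf nl rest.tail
        else scanSeg blk strg delim buf nl rest
      else if strg then
        if c = '\\' then
          match rest with
          | [] => if nl then ⟨blk, strg, delim, buf ++ [c, '\n'], true⟩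
                  else ⟨blk, strg, delim, buf ++ [c], false⟩
          | d :: rest' => scanSeg blk strg delim (buf ++ [c, d]) nl rest'
        else if some c = delim then scanSeg blk false none (buf ++ [c]) nl rest
        else scanSeg blk strg delim (buf ++ [c]) nl rest
      else if c = '"' ∨ c = '\'' then scanSeg blk true (some c) (buf ++ [c]) nl rest
      else if c = '/' ∧ rest.head? = some '*' then scanSeg true strg delim buf nl rest.tail
      else if c = '/' ∧ rest.head? = some '/' then scanSeg blk strg delim buf nl (skipSegB rest.tail)
      else if c = '\r' then scanSeg blk strg delim buf nl rest
      else scanSeg blk strg delim (buf ++ [c]) nl rest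
termination_by _ _ _ _ _ xs => xs.length
decreasing_by
  all_goals simp only [skipSegB, List.length_cons, List.length_tail]
  all_goals first
    | omega
    | (refine Nat.lt_succ_of_le (Nat.le_trans (List.length_dropWhile_le _ _) ?_)
       simp only [List.length_tail]
       omega)

-- B's outer `for idx, seg in enumerate(segments)` loop (last segment has no '\n' after it)
def scanSegs : Bool → Bool → Option Char → Int → List Char → List (Int × String) → List (List Char) → List (Int × String)
  | _, _, _, _, _, acc, [] => acc
  | blk, strg, delim, lineno, buf, acc, [seg] =>
      let r := scanSeg blk strg delim buf false seg
      if r.buf ≠ [] ∨ lineno = 1 then acc ++ [(lineno, String.ofList r.buf)] else acc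
  | blk, strg, delim, lineno, buf, acc, seg :: seg2 :: segs =>
      let r := scanSeg blk strg delim buf true seg
      if r.consumed then scanSegs r.blk r.strg r.delim lineno r.buf acc (seg2 :: segs)
      else scanSegs r.blk r.strg r.delim (lineno + 1) []
             (acc ++ [(lineno, String.ofList (r.buf ++ if r.strg then ['\n'] else []))]) (seg2 :: segs)

-- source.split('\n')
def splitNL : List Char → List (List Char)
  | [] => [[]]
  | c :: xs =>
      if c = '\n' then [] :: splitNL xs
      else
        match splitNL xs with
        | [] => [[c]]
        | s :: ss => (c :: s) :: ss

def strip_comments_preserve_lines_alt (source : String) : List (Int × String) :=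
  scanSegs false false none 1 [] [] (splitNL source.toList)

-- ===== PRECONDITION & SPEC =====
def Spec_strip_comments_preserve_lines (source : String) (out : List (Int × String)) : Prop := out = strip_comments_preserve_lines_alt source
instance (source : String) (out : List (Int × String)) : Decidable (Spec_strip_comments_preserve_lines source out) := by unfold Spec_strip_comments_preserve_lines; infer_instance

-- ===== CLAIM (what is proved, stated in full; the proofs are below) =====
def Claim_equal_strip_comments_preserve_lines : Prop := ∀ (source : String), Dom_strip_comments_preserve_lines source → Spec_strip_comments_preserve_lines source (strip_comments_preserve_lines source)

-- ===== LEMMAS AND PROOFS =====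

-- state invariant of the scanners (holds for the initial state and is preserved)
def ScInv (blk strg : Bool) (delim : Option Char) : Prop :=
  (blk = true → strg = false) ∧ (strg = true → delim ≠ some '\n')

theorem splitNL_ne_nil (xs : List Char) : splitNL xs ≠ [] := by
  induction xs with
  | nil => simp [splitNL]
  | cons c xs ih =>
    simp only [splitNL]
    split
    · simp
    · cases h : splitNL xs <;> simp

theorem splitNL_no_nl (xs : List Char) (h : '\n' ∉ xs) : splitNL xs = [xs] := by
  induction xs with
  | nil => simp [splitNL]
  | cons c xs ih =>
    simp only [List.mem_cons, not_or] at h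
    simp only [splitNL, if_neg (Ne.symm h.1)]
    rw [ih h.2]

theorem splitNL_app (seg ys : List Char) (h : '\n' ∉ seg) :
    splitNL (seg ++ '\n' :: ys) = seg :: splitNL ys := by
  induction seg with
  | nil => simp [splitNL]
  | cons c seg ih =>
    simp only [List.mem_cons, not_or] at h
    simp only [List.cons_append, splitNL, if_neg (Ne.symm h.1)]
    rw [ih h.2]

theorem skip_app (seg ys : List Char) (h : '\n' ∉ seg) :
    skipLineA (seg ++ '\n' :: ys) = skipSegB seg ++ '\n' :: ys := by
  induction seg with
  | nil => simp [skipLineA, skipSegB, List.dropWhile]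
  | cons c seg ih =>
    simp only [List.mem_cons, not_or] at h
    by_cases hr : c = '\r'
    · subst hr; simp [skipLineA, skipSegB, List.dropWhile]
    · simp only [skipLineA, skipSegB, List.cons_append, List.dropWhile_cons] at *
      have h1 : (c != '\n' && c != '\r') = true := by
        simp [hr]
        exact Ne.symm h.1
      have h2 : (c != '\r') = true := by simp [hr]
      rw [h1, h2]
      simpa using ih h.2

theorem invPres (blk strg : Bool) (delim : Option Char) (buf : List Char) (nl : Bool)
    (seg : List Char) (hinv : ScInv blk strg delim) :
    ScInv (scanSeg blk strg delim buf nl seg).blk (scanSeg blk strg delim buf nl seg).strg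
      (scanSeg blk strg delim buf nl seg).delim := by
  fun_induction scanSeg blk strg delim buf nl seg
  all_goals first
  | exact hinv
  | (rename_i ih
     apply ih
     first
     | exact hinv
     | (refine ⟨fun h => ?_, fun h => ?_⟩
        · first | exact hinv.1 h | simp_all
        · first | exact hinv.2 h | (rcases ‹_ ∨ _› with rfl | rfl <;> decide) | simp_all))

theorem skip_no_nl (xs : List Char) (h : '\n' ∉ xs) : skipLineA xs = skipSegB xs := by
  induction xs with
  | nil => simp [skipLineA, skipSegB]
  | cons c xs ih =>
    simp only [List.mem_cons, not_or] at h
    simp only [skipLineA, skipSegB, List.dropWhile_cons] at *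
    have h1 : (c != '\n') = true := by simp; exact Ne.symm h.1
    rw [h1]
    cases hr : (c != '\r') <;> simp [ih h.2]

theorem dropWhile_not_mem {p : Char → Bool} {a : Char} {xs : List Char} (h : a ∉ xs) :
    a ∉ xs.dropWhile p :=
  fun hm => h ((List.dropWhile_sublist p).subset hm)

theorem L2 (blk strg : Bool) (delim : Option Char) (buf : List Char) (nl : Bool) (seg : List Char) :
    nl = false → '\n' ∉ seg → ScInv blk strg delim → ∀ (lineno : Int) (acc : List (Int × String)),
      scanA blk strg delim lineno buf acc seg =
        (if (scanSeg blk strg delim buf nl seg).buf ≠ [] ∨ lineno = 1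
         then acc ++ [(lineno, String.ofList (scanSeg blk strg delim buf nl seg).buf)] else acc) := by
  fun_induction scanSeg blk strg delim buf nl seg
  all_goals intro hnl hn hinv lineno acc
  case case1 => simp [scanA]
  case case2 =>
    rename_i strg delim buf nl c rest h ih
    obtain ⟨rfl, hh⟩ := h
    rw [scanA, if_pos rfl, if_pos ⟨rfl, hh⟩]
    exact ih hnl (fun hm => hn (List.mem_cons_of_mem _ (List.mem_of_mem_tail hm)))
      ⟨fun _ => hinv.1 rfl, hinv.2⟩ lineno acc
  case case3 =>
    rename_i strg delim buf nl c rest h ih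
    simp only [List.mem_cons, not_or] at hn
    rw [scanA, if_pos rfl, if_neg h, if_neg (Ne.symm hn.1)]
    exact ih hnl hn.2 hinv lineno acc
  case case4 => exact absurd hnl (by simp)
  case case5 =>
    rename_i blk delim buf nl hb hnlt
    rw [scanA, if_neg hb, if_pos rfl, if_neg (by simp : ¬('\\' = '\\' ∧ ([] : List Char) ≠ []))]
    by_cases hd : some '\\' = delim
    · rw [if_pos hd, scanA]
      try simp
    · rw [if_neg hd, if_neg (by decide), scanA]
      try simp
  case case6 =>
    rename_i blk delim buf nl hb d rest ih
    simp only [List.mem_cons, not_or] at hn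
    rw [scanA, if_neg hb, if_pos rfl, if_pos ⟨rfl, by simp⟩]
    simp only [List.take_succ_cons, List.take_zero, List.tail_cons]
    exact ih hnl hn.2.2 hinv lineno acc
  case case7 =>
    rename_i blk buf nl c rest hb hc ih
    simp only [List.mem_cons, not_or] at hn
    rw [scanA, if_neg hb, if_pos rfl, if_neg (fun hx => hc hx.1), if_pos rfl]
    exact ih hnl hn.2 ⟨fun _ => rfl, by simp⟩ lineno acc
  case case8 =>
    rename_i blk delim buf nl c rest hb hc hd ih
    simp only [List.mem_cons, not_or] at hn
    rw [scanA, if_neg hb, if_pos rfl, if_neg (fun hx => hc hx.1), if_neg hd,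
      if_neg (Ne.symm hn.1)]
    exact ih hnl hn.2 hinv lineno acc
  case case9 =>
    rename_i blk strg delim buf nl c rest hb hs h ih
    simp only [List.mem_cons, not_or] at hn
    rw [scanA, if_neg hb, if_neg hs, if_pos h]
    exact ih hnl hn.2
      ⟨fun hbb => absurd hbb hb, fun _ => by rcases h with rfl | rfl <;> decide⟩ lineno acc
  case case10 =>
    rename_i blk strg delim buf nl c rest hb hs hq h ih
    obtain ⟨rfl, hh⟩ := h
    rw [scanA, if_neg hb, if_neg hs, if_neg hq, if_pos ⟨rfl, hh⟩]
    exact ih hnl (fun hm => hn (List.mem_cons_of_mem _ (List.mem_of_mem_tail hm)))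
      ⟨fun _ => by simpa using hs, hinv.2⟩ lineno acc
  case case11 =>
    rename_i blk strg delim buf nl c rest hb hs hq hstar h ih
    obtain ⟨rfl, hh⟩ := h
    have hn' : '\n' ∉ rest.tail := fun hm => hn (List.mem_cons_of_mem _ (List.mem_of_mem_tail hm))
    rw [scanA, if_neg hb, if_neg hs, if_neg hq, if_neg hstar, if_pos ⟨rfl, hh⟩,
      skip_no_nl _ hn']
    exact ih hnl (dropWhile_not_mem hn') hinv lineno acc
  case case12 =>
    rename_i blk strg delim buf nl rest hb hs hq hstar hsl ih
    simp only [List.mem_cons, not_or] at hn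
    rw [scanA, if_neg hb, if_neg hs, if_neg hq, if_neg hstar, if_neg hsl, if_pos rfl]
    exact ih hnl hn.2 hinv lineno acc
  case case13 =>
    rename_i blk strg delim buf nl c rest hb hs hq hstar hsl hr ih
    simp only [List.mem_cons, not_or] at hn
    rw [scanA, if_neg hb, if_neg hs, if_neg hq, if_neg hstar, if_neg hsl, if_neg hr,
      if_neg (Ne.symm hn.1)]
    exact ih hnl hn.2 hinv lineno acc

theorem head_app_ne {y : Char} (hy : y ≠ '\n') (rest ys : List Char) :
    ((rest ++ '\n' :: ys).head? = some y) ↔ rest.head? = some y := by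
  cases rest with
  | nil => simp; exact fun h => (hy h.symm).elim
  | cons a l => simp

theorem L1 (blk strg : Bool) (delim : Option Char) (buf : List Char) (nl : Bool) (seg : List Char) :
    nl = true → '\n' ∉ seg → ScInv blk strg delim →
    ∀ (lineno : Int) (acc : List (Int × String)) (ys : List Char),
      scanA blk strg delim lineno buf acc (seg ++ '\n' :: ys) =
        (if (scanSeg blk strg delim buf nl seg).consumed then
          scanA (scanSeg blk strg delim buf nl seg).blk (scanSeg blk strg delim buf nl seg).strg
            (scanSeg blk strg delim buf nl seg).delim lineno (scanSeg blk strg delim buf nl seg).buf acc ys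
         else
          scanA (scanSeg blk strg delim buf nl seg).blk (scanSeg blk strg delim buf nl seg).strg
            (scanSeg blk strg delim buf nl seg).delim (lineno + 1) []
            (acc ++ [(lineno, String.ofList ((scanSeg blk strg delim buf nl seg).buf ++
              if (scanSeg blk strg delim buf nl seg).strg then ['\n'] else []))]) ys) := by
  fun_induction scanSeg blk strg delim buf nl seg
  all_goals intro hnl hn hinv lineno acc ys
  case case1 =>
    rename_i blk strg delim buf nl
    by_cases hb : blk = true
    · have hs := hinv.1 hb
      rw [List.nil_append, scanA, if_pos hb, if_neg (fun hx => absurd hx.1 (by decide)),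
        if_pos rfl]
      simp [hs]
    · by_cases hs : strg = true
      · rw [List.nil_append, scanA, if_neg hb, if_pos hs,
          if_neg (fun hx => absurd hx.1 (by decide)), if_neg (fun hd => hinv.2 hs hd.symm),
          if_pos rfl]
        simp [hs]
      · rw [List.nil_append, scanA, if_neg hb, if_neg hs, if_neg (by decide),
          if_neg (fun hx => absurd hx.1 (by decide)), if_neg (fun hx => absurd hx.1 (by decide)),
          if_neg (by decide), if_pos rfl]
        simp only [Bool.not_eq_true] at hs
        simp [hs]
  case case2 =>
    rename_i strg delim buf nl c rest h ih
    obtain ⟨rfl, hh⟩ := h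
    cases rest with
    | nil => simp at hh
    | cons a rest' =>
      simp only [List.head?_cons, Option.some.injEq] at hh
      subst hh
      simp only [List.mem_cons, not_or] at hn
      simp only [List.cons_append]
      rw [scanA, if_pos rfl, if_pos ⟨rfl, rfl⟩]
      simp only [List.tail_cons] at ih ⊢
      exact ih hnl hn.2.2 ⟨fun _ => hinv.1 rfl, hinv.2⟩ lineno acc ys
  case case3 =>
    rename_i strg delim buf nl c rest h ih
    simp only [List.mem_cons, not_or] at hn
    rw [List.cons_append, scanA, if_pos rfl,
      if_neg (fun hx => h ⟨hx.1, (head_app_ne (by decide) rest ys).mp hx.2⟩),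
      if_neg (Ne.symm hn.1)]
    exact ih hnl hn.2 hinv lineno acc ys
  case case4 =>
    rename_i blk delim buf hb
    rw [List.cons_append, List.nil_append, scanA, if_neg hb, if_pos rfl,
      if_pos ⟨rfl, by simp⟩]
    simp
  case case5 =>
    rename_i blk delim buf nl hb hnlt
    exact absurd hnl hnlt
  case case6 =>
    rename_i blk delim buf nl hb d rest ih
    simp only [List.mem_cons, not_or] at hn
    simp only [List.cons_append]
    rw [scanA, if_neg hb, if_pos rfl, if_pos ⟨rfl, by simp⟩]
    simp only [List.take_succ_cons, List.take_zero, List.tail_cons]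
    exact ih hnl hn.2.2 hinv lineno acc ys
  case case7 =>
    rename_i blk buf nl c rest hb hc ih
    simp only [List.mem_cons, not_or] at hn
    rw [List.cons_append, scanA, if_neg hb, if_pos rfl, if_neg (fun hx => hc hx.1), if_pos rfl]
    exact ih hnl hn.2 ⟨fun _ => rfl, by simp⟩ lineno acc ys
  case case8 =>
    rename_i blk delim buf nl c rest hb hc hd ih
    simp only [List.mem_cons, not_or] at hn
    rw [List.cons_append, scanA, if_neg hb, if_pos rfl, if_neg (fun hx => hc hx.1), if_neg hd,
      if_neg (Ne.symm hn.1)]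
    exact ih hnl hn.2 hinv lineno acc ys
  case case9 =>
    rename_i blk strg delim buf nl c rest hb hs h ih
    simp only [List.mem_cons, not_or] at hn
    rw [List.cons_append, scanA, if_neg hb, if_neg hs, if_pos h]
    exact ih hnl hn.2
      ⟨fun hbb => absurd hbb hb, fun _ => by rcases h with rfl | rfl <;> decide⟩ lineno acc ys
  case case10 =>
    rename_i blk strg delim buf nl c rest hb hs hq h ih
    obtain ⟨rfl, hh⟩ := h
    cases rest with
    | nil => simp at hh
    | cons a rest' =>
      simp only [List.head?_cons, Option.some.injEq] at hh
      subst hh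
      simp only [List.mem_cons, not_or] at hn
      simp only [List.cons_append]
      rw [scanA, if_neg hb, if_neg hs, if_neg hq, if_pos ⟨rfl, rfl⟩]
      simp only [List.tail_cons] at ih ⊢
      exact ih hnl hn.2.2 ⟨fun _ => by simpa using hs, hinv.2⟩ lineno acc ys
  case case11 =>
    rename_i blk strg delim buf nl c rest hb hs hq hstar h ih
    obtain ⟨rfl, hh⟩ := h
    cases rest with
    | nil => simp at hh
    | cons a rest' =>
      simp only [List.head?_cons, Option.some.injEq] at hh
      subst hh
      simp only [List.mem_cons, not_or] at hn
      simp only [List.cons_append]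
      rw [scanA, if_neg hb, if_neg hs, if_neg hq, if_neg (fun hx => by simp at hx),
        if_pos ⟨rfl, rfl⟩]
      simp only [List.tail_cons] at ih ⊢
      rw [skip_app rest' ys hn.2.2]
      exact ih hnl (dropWhile_not_mem hn.2.2) hinv lineno acc ys
  case case12 =>
    rename_i blk strg delim buf nl rest hb hs hq hstar hsl ih
    simp only [List.mem_cons, not_or] at hn
    rw [List.cons_append, scanA, if_neg hb, if_neg hs, if_neg (by decide),
      if_neg (fun hx => hstar ⟨hx.1, (head_app_ne (by decide) rest ys).mp hx.2⟩),
      if_neg (fun hx => hsl ⟨hx.1, (head_app_ne (by decide) rest ys).mp hx.2⟩),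
      if_pos rfl]
    exact ih hnl hn.2 hinv lineno acc ys
  case case13 =>
    rename_i blk strg delim buf nl c rest hb hs hq hstar hsl hr ih
    simp only [List.mem_cons, not_or] at hn
    rw [List.cons_append, scanA, if_neg hb, if_neg hs, if_neg hq,
      if_neg (fun hx => hstar ⟨hx.1, (head_app_ne (by decide) rest ys).mp hx.2⟩),
      if_neg (fun hx => hsl ⟨hx.1, (head_app_ne (by decide) rest ys).mp hx.2⟩),
      if_neg hr, if_neg (Ne.symm hn.1)]
    exact ih hnl hn.2 hinv lineno acc ys

theorem nl_decomp : ∀ (xs : List Char), '\n' ∈ xs → ∃ seg ys, xs = seg ++ '\n' :: ys ∧ '\n' ∉ seg := by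
  intro xs h
  induction xs with
  | nil => simp at h
  | cons c rest ih =>
    by_cases hc : c = '\n'
    · exact ⟨[], rest, by simp [hc], by simp⟩
    · have hr : '\n' ∈ rest := by
        rcases List.mem_cons.mp h with h1 | h1
        · exact absurd h1.symm hc
        · exact h1
      obtain ⟨seg, ys, rfl, hns⟩ := ih hr
      refine ⟨c :: seg, ys, by simp, ?_⟩
      simp only [List.mem_cons, not_or]
      exact ⟨fun hh => hc hh.symm, hns⟩

theorem mainEq (n : Nat) : ∀ (xs : List Char), xs.length ≤ n →
    ∀ blk strg delim lineno buf acc, ScInv blk strg delim →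
      scanA blk strg delim lineno buf acc xs =
        scanSegs blk strg delim lineno buf acc (splitNL xs) := by
  induction n with
  | zero =>
    intro xs hlen blk strg delim lineno buf acc hinv
    have hx : xs = [] := List.eq_nil_of_length_eq_zero (Nat.le_zero.mp hlen)
    subst hx
    simp [splitNL, scanSegs, scanA, scanSeg]
  | succ n ih =>
    intro xs hlen blk strg delim lineno buf acc hinv
    by_cases hmem : '\n' ∈ xs
    · obtain ⟨seg, ys, rfl, hns⟩ := nl_decomp xs hmem
      obtain ⟨s, ss, hsp⟩ : ∃ s ss, splitNL ys = s :: ss := by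
        cases h : splitNL ys with
        | nil => exact absurd h (splitNL_ne_nil ys)
        | cons s ss => exact ⟨s, ss, rfl⟩
      have hys : ys.length ≤ n := by
        simp only [List.length_append, List.length_cons] at hlen; omega
      have hpres := invPres blk strg delim buf true seg hinv
      rw [splitNL_app seg ys hns, hsp,
        L1 blk strg delim buf true seg rfl hns hinv lineno acc ys]
      simp only [scanSegs]
      by_cases hc : (scanSeg blk strg delim buf true seg).consumed = true
      · rw [if_pos hc, if_pos hc, ← hsp]
        exact ih ys hys _ _ _ lineno _ acc hpres
      · rw [if_neg hc, if_neg hc, ← hsp]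
        exact ih ys hys _ _ _ (lineno + 1) _ _ hpres
    · rw [splitNL_no_nl xs hmem]
      simp only [scanSegs]
      exact L2 blk strg delim buf false xs rfl hmem hinv lineno acc

-- ===== VERDICT (by name: the statement is the Claim_ definition above) =====
theorem strip_comments_preserve_lines_spec : Claim_equal_strip_comments_preserve_lines := by
  intro source _
  unfold Spec_strip_comments_preserve_lines strip_comments_preserve_lines strip_comments_preserve_lines_alt
  exact mainEq source.toList.length source.toList le_rfl false false none 1 [] []
    ⟨by simp, by simp⟩
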